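-- pv_equiv track=rewrite | github.com/EtherNeil/advent-of-code | 2025/4/main.py | check_paper_accessibility
-- ===== SOURCE A (Python) =====
-- def neighbors(
--     matrix: list[list[str]], radius: int, row_number: int, column_number: int
-- ) -> list[str]:
--     """Collect the neighbors of a given cell in a matrix."""
--     return [
--         [
--             (
--                 "O"
--                 if (i == row_number and j == column_number)
--                 else (
--                     matrix[i][j]
--                     if 0 <= i < len(matrix) and 0 <= j < len(matrix[0])
--                     else " "
--                 )
--             )
--             for j in range(column_number - radius, column_number + radius + 1)
--         ]
--         for i in range(row_number - radius, row_number + radius + 1)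
--     ]
--
-- def check_paper_accessibility(
--     matrix: list[list[str]], x_index: int, y_index: int
-- ) -> bool | None:
--     """Check the accessibility of a given roll of paper."""
--     if matrix[y_index][x_index] != "@":
--         return None
--     neighbors_list = neighbors(matrix, 1, y_index, x_index)
--     count_roll_neighbors = 0
--     for row in neighbors_list:
--         for element in row:
--             if element == "@":
--                 count_roll_neighbors += 1
--     return count_roll_neighbors < 4
-- ===== SOURCE B (Python) =====
-- def check_paper_accessibility(
--     matrix: list[list[str]], x_index: int, y_index: int
-- ) -> bool | None:
--     """Check the accessibility of a given roll of paper."""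
--     if matrix[y_index][x_index] != "@":
--         return None
--     rows = len(matrix)
--     cols = len(matrix[0])
--     count = 0
--     for dy in (-1, 0, 1):
--         for dx in (-1, 0, 1):
--             if dy == 0 and dx == 0:
--                 continue
--             i = y_index + dy
--             j = x_index + dx
--             if 0 <= i < rows and 0 <= j < cols and matrix[i][j] == "@":
--                 count += 1
--     return count < 4
-- ===== Notes on version B (the rewrite author's own statement) =====
-- stated objective: simpler
-- what changed: B drops the neighbors() helper and its 3x3 sentinel grid entirely and counts '@' cells directly over the 8 neighbor offsets in one scan, keeping the initial '@' guard.
import Mathlib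
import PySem

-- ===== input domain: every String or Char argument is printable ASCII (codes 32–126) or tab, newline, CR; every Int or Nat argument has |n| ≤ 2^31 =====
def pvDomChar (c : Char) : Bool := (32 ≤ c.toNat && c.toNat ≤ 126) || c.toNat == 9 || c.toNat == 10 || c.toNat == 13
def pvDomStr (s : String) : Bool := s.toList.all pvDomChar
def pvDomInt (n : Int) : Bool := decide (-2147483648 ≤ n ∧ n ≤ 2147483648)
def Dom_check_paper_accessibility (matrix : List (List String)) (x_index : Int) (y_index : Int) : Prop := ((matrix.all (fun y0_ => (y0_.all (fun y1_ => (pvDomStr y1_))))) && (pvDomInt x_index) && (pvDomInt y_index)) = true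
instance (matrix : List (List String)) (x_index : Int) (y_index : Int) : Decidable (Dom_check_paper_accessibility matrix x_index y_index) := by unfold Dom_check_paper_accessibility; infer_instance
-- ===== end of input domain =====

-- B drops A's `neighbors` helper and its 3x3 sentinel grid and counts '@' neighbors directly
-- over the 8 offsets (objective: simpler decomposition, same cost).

-- ===== PORT A =====
-- matrix[i][j] under the guard 0<=i<len(matrix) and 0<=j<len(matrix[0]); on a ragged row
-- shorter than matrix[0] Python raises IndexError where getD returns "" — excluded by Pre_.
def pvCellA (matrix : List (List String)) (i j : Int) : String :=
  if 0 ≤ i ∧ i < (matrix.length : Int) ∧ 0 ≤ j ∧ j < ((matrix.headD []).length : Int) then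
    (matrix.getD i.toNat []).getD j.toNat ""
  else " "

-- neighbors(matrix, radius, row_number, column_number)
def pvNeighbors (matrix : List (List String)) (radius row_number column_number : Int) : List (List String) :=
  (PySem.List.pyRange (row_number - radius) (row_number + radius + 1) 1).map (fun i =>
    (PySem.List.pyRange (column_number - radius) (column_number + radius + 1) 1).map (fun j =>
      if i = row_number ∧ j = column_number then "O" else pvCellA matrix i j))

def check_paper_accessibility (matrix : List (List String)) (x_index : Int) (y_index : Int) : Option Bool :=
  match PySem.List.pyGet? matrix y_index with
  | none => none   -- Python raises IndexError here; excluded by Pre_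
  | some row =>
    match PySem.List.pyGet? row x_index with
    | none => none   -- Python raises IndexError here; excluded by Pre_
    | some cell =>
      if cell ≠ "@" then none
      else
        let neighbors_list := pvNeighbors matrix 1 y_index x_index
        let count_roll_neighbors : Int :=
          neighbors_list.foldl (fun acc row =>
            row.foldl (fun a element => if element = "@" then a + 1 else a) acc) 0
        some (decide (count_roll_neighbors < 4))

-- ===== PORT B =====
def check_paper_accessibility_alt (matrix : List (List String)) (x_index : Int) (y_index : Int) : Option Bool :=
  match PySem.List.pyGet? matrix y_index with
  | none => none   -- Python raises IndexError here; excluded by Pre_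
  | some row =>
    match PySem.List.pyGet? row x_index with
    | none => none   -- Python raises IndexError here; excluded by Pre_
    | some cell =>
      if cell ≠ "@" then none
      else
        let rows : Int := matrix.length
        let cols : Int := (matrix.headD []).length
        let count : Int :=
          [(-1 : Int), 0, 1].foldl (fun acc dy =>
            [(-1 : Int), 0, 1].foldl (fun acc dx =>
              if dy = 0 ∧ dx = 0 then acc
              else
                -- matrix[i][j]: on a ragged row Python raises IndexError where getD
                -- returns "" (exactly as Python A does); excluded by Pre_.
                if 0 ≤ y_index + dy ∧ y_index + dy < rows ∧ 0 ≤ x_index + dx ∧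
                    x_index + dx < cols ∧
                    (matrix.getD (y_index + dy).toNat []).getD (x_index + dx).toNat "" = "@"
                then acc + 1
                else acc) acc) 0
        some (decide (count < 4))

-- ===== PRECONDITION & SPEC =====
-- Pre_ excludes exactly the inputs on which the Python A raises IndexError:
-- matrix[y_index][x_index] out of range, or (when that cell is "@") a scanned neighbor
-- position inside the len(matrix) × len(matrix[0]) box but beyond the end of its own
-- (ragged, shorter) row. Python B raises on exactly the same inputs.
def Pre_check_paper_accessibility (matrix : List (List String)) (x_index : Int) (y_index : Int) : Prop :=
  ((PySem.List.pyGet? matrix y_index).bind (fun row => PySem.List.pyGet? row x_index)).isSome ∧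
  ((PySem.List.pyGet? matrix y_index).bind (fun row => PySem.List.pyGet? row x_index) = some "@" →
    ∀ i ∈ [y_index - 1, y_index, y_index + 1], ∀ j ∈ [x_index - 1, x_index, x_index + 1],
      ¬(i = y_index ∧ j = x_index) →
      0 ≤ i → i < (matrix.length : Int) → 0 ≤ j → j < ((matrix.headD []).length : Int) →
      j < ((matrix.getD i.toNat []).length : Int))

instance (matrix : List (List String)) (x_index : Int) (y_index : Int) : Decidable (Pre_check_paper_accessibility matrix x_index y_index) := by unfold Pre_check_paper_accessibility; infer_instance

def pvWitness_check_paper_accessibility : List (List String) × Int × Int :=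
  ([["@", "."], [".", "@"]], 0, 0)

def Spec_check_paper_accessibility (matrix : List (List String)) (x_index : Int) (y_index : Int) (out : Option Bool) : Prop := out = check_paper_accessibility_alt matrix x_index y_index
instance (matrix : List (List String)) (x_index : Int) (y_index : Int) (out : Option Bool) : Decidable (Spec_check_paper_accessibility matrix x_index y_index out) := by unfold Spec_check_paper_accessibility; infer_instance

-- ===== CLAIM (what is proved, stated in full; the proofs are below) =====
def Claim_equal_check_paper_accessibility : Prop := ∀ (matrix : List (List String)) (x_index : Int) (y_index : Int), Dom_check_paper_accessibility matrix x_index y_index → Pre_check_paper_accessibility matrix x_index y_index → Spec_check_paper_accessibility matrix x_index y_index (check_paper_accessibility matrix x_index y_index)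

-- ===== LEMMAS AND PROOFS =====

lemma pvRange3 (l h a b c : Int) (h1 : h = l + 3) (ha : a = l) (hb : b = l + 1) (hc : c = l + 2) :
    PySem.List.pyRange l h 1 = [a, b, c] := by
  rw [h1, ha, hb, hc,
      PySem.List.pyRange_one_cons (by omega), PySem.List.pyRange_one_cons (by omega),
      PySem.List.pyRange_one_cons (by omega), PySem.List.pyRange_one_eq_nil (by omega),
      show (l + 1 + 1 : Int) = l + 2 from by ring]

-- 0/1 indicator of an "@" cell, used to turn both counting loops into sums
def pvInd (s : String) : Int := if s = "@" then 1 else 0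

def pvHit (matrix : List (List String)) (i j : Int) : Int :=
  if 0 ≤ i ∧ i < (matrix.length : Int) ∧ 0 ≤ j ∧ j < ((matrix.headD []).length : Int) ∧
      (matrix.getD i.toNat []).getD j.toNat "" = "@" then 1 else 0

lemma pvInd_grid (m : List (List String)) (y x i j : Int) (h : ¬(i = y ∧ j = x)) :
    pvInd (if i = y ∧ j = x then "O" else pvCellA m i j) = pvHit m i j := by
  rw [if_neg h]
  unfold pvInd pvHit pvCellA
  by_cases hb : 0 ≤ i ∧ i < (m.length : Int) ∧ 0 ≤ j ∧ j < ((m.headD []).length : Int)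
  · rw [if_pos hb]
    by_cases hq : (m.getD i.toNat []).getD j.toNat "" = "@"
    · rw [if_pos hq, if_pos ⟨hb.1, hb.2.1, hb.2.2.1, hb.2.2.2, hq⟩]
    · rw [if_neg hq, if_neg (by tauto)]
  · rw [if_neg hb, if_neg (show ¬(" " = "@") from by decide), if_neg (by tauto)]

lemma pvInd_center (m : List (List String)) (y x i j : Int) (hi : i = y) (hj : j = x) :
    pvInd (if i = y ∧ j = x then "O" else pvCellA m i j) = 0 := by
  rw [if_pos ⟨hi, hj⟩]; rfl

-- A's grid-then-rescan count equals B's direct 8-offset count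
lemma pvCount_eq (matrix : List (List String)) (x y : Int) :
    (pvNeighbors matrix 1 y x).foldl (fun acc row =>
      row.foldl (fun a element => if element = "@" then a + 1 else a) acc) (0:Int)
    = [(-1 : Int), 0, 1].foldl (fun acc dy =>
        [(-1 : Int), 0, 1].foldl (fun acc dx =>
          if dy = 0 ∧ dx = 0 then acc
          else
            if 0 ≤ y + dy ∧ y + dy < (matrix.length : Int) ∧ 0 ≤ x + dx ∧
                x + dx < ((matrix.headD []).length : Int) ∧
                (matrix.getD (y + dy).toNat []).getD (x + dx).toNat "" = "@" then acc + 1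
            else acc) acc) (0:Int) := by
  have hstep : (fun (a : Int) (element : String) => if element = "@" then a + 1 else a)
      = (fun a element => a + pvInd element) := by
    funext a e; unfold pvInd; split_ifs <;> ring
  have hrow : (fun (acc : Int) (row : List String) =>
        row.foldl (fun a element => if element = "@" then a + 1 else a) acc)
      = (fun acc row => acc + (row.map pvInd).sum) := by
    funext acc row
    rw [hstep, ← PySem.List.foldl_add row pvInd acc]
  have hBin : ∀ dy : Int, (fun (acc : Int) (dx : Int) =>
          if dy = 0 ∧ dx = 0 then acc
          else
            if 0 ≤ y + dy ∧ y + dy < (matrix.length : Int) ∧ 0 ≤ x + dx ∧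
                x + dx < ((matrix.headD []).length : Int) ∧
                (matrix.getD (y + dy).toNat []).getD (x + dx).toNat "" = "@" then acc + 1
            else acc)
      = (fun acc dx => acc + (if dy = 0 ∧ dx = 0 then 0 else pvHit matrix (y + dy) (x + dx))) := by
    intro dy; funext acc dx
    unfold pvHit; split_ifs <;> ring
  have hBout : (fun (acc : Int) (dy : Int) =>
        [(-1 : Int), 0, 1].foldl (fun acc dx =>
          if dy = 0 ∧ dx = 0 then acc
          else
            if 0 ≤ y + dy ∧ y + dy < (matrix.length : Int) ∧ 0 ≤ x + dx ∧
                x + dx < ((matrix.headD []).length : Int) ∧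
                (matrix.getD (y + dy).toNat []).getD (x + dx).toNat "" = "@" then acc + 1
            else acc) acc)
      = (fun acc dy => acc + (([(-1 : Int), 0, 1]).map
          (fun dx => if dy = 0 ∧ dx = 0 then 0 else pvHit matrix (y + dy) (x + dx))).sum) := by
    funext acc dy
    rw [hBin dy, ← PySem.List.foldl_add]
  rw [hrow, hBout,
      PySem.List.foldl_add ((pvNeighbors matrix 1 y x)) (fun row => (row.map pvInd).sum) 0,
      PySem.List.foldl_add ([(-1 : Int), 0, 1])
        (fun dy => (([(-1 : Int), 0, 1]).map
          (fun dx => if dy = 0 ∧ dx = 0 then 0 else pvHit matrix (y + dy) (x + dx))).sum) 0]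
  unfold pvNeighbors
  rw [pvRange3 (y - 1) (y + 1 + 1) (y + -1) (y + 0) (y + 1) (by ring) (by ring) (by ring) (by ring),
      pvRange3 (x - 1) (x + 1 + 1) (x + -1) (x + 0) (x + 1) (by ring) (by ring) (by ring) (by ring)]
  simp only [List.map_cons, List.map_nil, List.sum_cons, List.sum_nil]
  rw [pvInd_grid matrix y x (y + -1) (x + -1) (by intro hc; omega),
      pvInd_grid matrix y x (y + -1) (x + 0) (by intro hc; omega),
      pvInd_grid matrix y x (y + -1) (x + 1) (by intro hc; omega),
      pvInd_grid matrix y x (y + 0) (x + -1) (by intro hc; omega),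
      pvInd_center matrix y x (y + 0) (x + 0) (by ring) (by ring),
      pvInd_grid matrix y x (y + 0) (x + 1) (by intro hc; omega),
      pvInd_grid matrix y x (y + 1) (x + -1) (by intro hc; omega),
      pvInd_grid matrix y x (y + 1) (x + 0) (by intro hc; omega),
      pvInd_grid matrix y x (y + 1) (x + 1) (by intro hc; omega)]
  norm_num

-- ===== VERDICT (by name: the statement is the Claim_ definition above) =====
theorem check_paper_accessibility_spec : Claim_equal_check_paper_accessibility := by
  intro matrix x_index y_index _ hpre
  unfold Spec_check_paper_accessibility
  obtain ⟨hsome, -⟩ := hpre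
  unfold check_paper_accessibility check_paper_accessibility_alt
  cases hy : PySem.List.pyGet? matrix y_index with
  | none => simp [hy] at hsome
  | some row =>
    cases hx : PySem.List.pyGet? row x_index with
    | none => simp [hy, hx] at hsome
    | some cell =>
      dsimp only
      rw [hx]
      dsimp only
      by_cases hc : cell = "@"
      · rw [if_neg (show ¬(cell ≠ "@") from by simp [hc]),
            if_neg (show ¬(cell ≠ "@") from by simp [hc])]
        simp only [pvCount_eq matrix x_index y_index]
      · rw [if_pos hc, if_pos hc]
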